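-- pv_equiv track=rewrite | github.com/jupiterbjy/ProjectIncubator | Coding Tests/SWEA/D2/2001.py | conv_sum_gen
-- ===== SOURCE A (Python) =====
-- def conv_sum_gen(grid, kernel_size):
--     size = len(grid) - kernel_size + 1
--     for col in range(size):
--         for row in range(size):
--             yield sum(
--                 grid[row + r][col + c] for r in range(kernel_size)
--                 for c in range(kernel_size)
--             )
-- ===== SOURCE B (Python) =====
-- def conv_sum_gen(grid, kernel_size):
--     # 2D prefix-sum table: each window sum becomes four table lookups.
--     n = len(grid)
--     k = kernel_size
--     size = n - k + 1
--     if size <= 0: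
--         return
--     # P[i][j] = sum of grid[r][c] for r < i, c < j  (top-left n x n region)
--     P = [[0] * (n + 1)]
--     for r in range(n):
--         prev = P[-1]
--         row = grid[r]
--         acc = 0
--         cur = [0]
--         for c in range(n):
--             acc += row[c]
--             cur.append(prev[c + 1] + acc)
--         P.append(cur)
--     for col in range(size):
--         for row in range(size):
--             yield (P[row + k][col + k] - P[row][col + k]
--                    - P[row + k][col] + P[row][col])
-- ===== Notes on version B (the rewrite author's own statement) =====
-- stated objective: alternative
-- what changed: Replaces the per-window O(kernel^2) double summation with a 2D prefix-sum table built once, so each window sum is four table lookups, emitted in the same column-major order.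
-- outside the precondition, e.g. on conv_sum_gen([[1], [2]], 0): A returns [0, 0, 0, 0, 0, 0, 0, 0, 0], B raises IndexError
import Mathlib
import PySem

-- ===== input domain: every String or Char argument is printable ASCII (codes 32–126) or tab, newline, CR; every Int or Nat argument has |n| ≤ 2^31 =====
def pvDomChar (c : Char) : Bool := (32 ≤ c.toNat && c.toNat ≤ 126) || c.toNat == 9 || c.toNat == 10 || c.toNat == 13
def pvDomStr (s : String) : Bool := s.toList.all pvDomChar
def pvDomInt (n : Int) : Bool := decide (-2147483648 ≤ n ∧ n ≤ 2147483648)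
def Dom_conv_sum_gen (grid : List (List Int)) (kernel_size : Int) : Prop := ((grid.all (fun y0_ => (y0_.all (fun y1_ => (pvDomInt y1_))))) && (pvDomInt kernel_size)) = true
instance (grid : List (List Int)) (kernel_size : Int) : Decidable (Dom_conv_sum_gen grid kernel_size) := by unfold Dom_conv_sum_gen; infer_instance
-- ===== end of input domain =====

-- B replaces A's per-window double summation by a 2D prefix-sum table built once (four table lookups per window, same column-major order).


-- ===== PORT A =====
def conv_sum_gen (grid : List (List Int)) (kernel_size : Int) : List Int :=
  let size : Int := (grid.length : Int) - kernel_size + 1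
  (PySem.List.pyRange 0 size 1).flatMap (fun col =>
    (PySem.List.pyRange 0 size 1).map (fun row =>
      ((PySem.List.pyRange 0 kernel_size 1).flatMap (fun r =>
        (PySem.List.pyRange 0 kernel_size 1).map (fun c =>
          PySem.List.pyGetD (PySem.List.pyGetD grid (row + r) []) (col + c) 0))).sum))

-- ===== PORT B =====
def conv_sum_gen_alt (grid : List (List Int)) (kernel_size : Int) : List Int :=
  let n := grid.length
  let k := kernel_size
  let size : Int := (n : Int) - k + 1
  if size ≤ 0 then []
  else
    let P := (List.range n).foldl (fun (P : List (List Int)) (r : Nat) =>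
      let prev := PySem.List.pyGetD P (-1) []
      let row := PySem.List.pyGetD grid (r : Int) []
      let cur := ((List.range n).foldl (fun (st : Int × List Int) (c : Nat) =>
        let acc := st.1 + PySem.List.pyGetD row (c : Int) 0
        (acc, st.2 ++ [PySem.List.pyGetD prev ((c : Int) + 1) 0 + acc])) (0, [0])).2
      P ++ [cur]) [List.replicate (n + 1) 0]
    (PySem.List.pyRange 0 size 1).flatMap (fun col =>
      (PySem.List.pyRange 0 size 1).map (fun row =>
        PySem.List.pyGetD (PySem.List.pyGetD P (row + k) []) (col + k) 0
        - PySem.List.pyGetD (PySem.List.pyGetD P row []) (col + k) 0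
        - PySem.List.pyGetD (PySem.List.pyGetD P (row + k) []) col 0
        + PySem.List.pyGetD (PySem.List.pyGetD P row []) col 0))

-- ===== PRECONDITION & SPEC =====
-- Pre_ excludes kernel_size < 0, and kernel_size = 0 on grids with a row shorter than the grid
-- (A returns an all-zero list of (n-k+1)^2 entries there purely as an artefact of summing empty
-- generators, while B's prefix-table indexing raises IndexError); when kernel_size ≥ 1 and a
-- window exists, a row shorter than the grid makes A itself raise IndexError.
def Pre_conv_sum_gen (grid : List (List Int)) (kernel_size : Int) : Prop :=
  0 ≤ kernel_size ∧
    ((grid.length : Int) - kernel_size + 1 ≤ 0 ∨ ∀ row ∈ grid, grid.length ≤ row.length)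
instance (grid : List (List Int)) (kernel_size : Int) : Decidable (Pre_conv_sum_gen grid kernel_size) := by
  unfold Pre_conv_sum_gen; infer_instance
def pvWitness_conv_sum_gen : List (List Int) × Int := ([[1, 2, 3], [4, 5, 6], [7, 8, 9]], 2)

def Spec_conv_sum_gen (grid : List (List Int)) (kernel_size : Int) (out : List Int) : Prop := out = conv_sum_gen_alt grid kernel_size
instance (grid : List (List Int)) (kernel_size : Int) (out : List Int) : Decidable (Spec_conv_sum_gen grid kernel_size out) := by unfold Spec_conv_sum_gen; infer_instance

-- ===== CLAIM (what is proved, stated in full; the proofs are below) =====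
def Claim_equal_conv_sum_gen : Prop := ∀ (grid : List (List Int)) (kernel_size : Int), Dom_conv_sum_gen grid kernel_size → Pre_conv_sum_gen grid kernel_size → Spec_conv_sum_gen grid kernel_size (conv_sum_gen grid kernel_size)

-- ===== LEMMAS AND PROOFS =====

-- grid[i][j] with default 0, Nat indices
def pvCell (grid : List (List Int)) (i j : Nat) : Int :=
  PySem.List.pyGetD (PySem.List.pyGetD grid (i : Int) []) (j : Int) 0

-- sum of grid[i][0..j-1]
def pvRowSum (grid : List (List Int)) (i j : Nat) : Int :=
  ((List.range j).map (fun c => pvCell grid i c)).sum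

-- 2D prefix sum: sum of grid[i'][j'] for i' < i, j' < j
def pvS (grid : List (List Int)) (i j : Nat) : Int :=
  ((List.range i).map (fun r => pvRowSum grid r j)).sum

-- the i-th row of the prefix table
def pvProw (grid : List (List Int)) (n i : Nat) : List Int :=
  (List.range (n + 1)).map (fun j => pvS grid i j)

lemma pv_sum_map_sub (l : List Nat) (f g : Nat → Int) :
    (l.map (fun x => f x - g x)).sum = (l.map f).sum - (l.map g).sum := by
  induction l with
  | nil => simp
  | cons a t ih => simp [ih]; ring

lemma pv_sum_flatMap (l : List Nat) (f : Nat → List Int) :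
    (l.flatMap f).sum = (l.map (fun x => (f x).sum)).sum := by
  rw [List.flatMap, List.sum_flatten, List.map_map]; rfl

lemma pvS_zero_col (grid : List (List Int)) (i : Nat) : pvS grid i 0 = 0 := by
  simp [pvS, pvRowSum]

lemma pvS_succ_row (grid : List (List Int)) (i j : Nat) :
    pvS grid (i + 1) j = pvS grid i j + pvRowSum grid i j := by
  simp [pvS, List.range_succ]

lemma pvProw_zero (grid : List (List Int)) (n : Nat) :
    pvProw grid n 0 = List.replicate (n + 1) 0 := by
  simp [pvProw, pvS]

-- the inner fold of port B: running row sum + appended table row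
lemma pv_inner_fold (prev row : List Int) (m : Nat) (a : Int) (l0 : List Int) :
    (List.range m).foldl (fun (st : Int × List Int) (c : Nat) =>
        (st.1 + PySem.List.pyGetD row (c : Int) 0,
         st.2 ++ [PySem.List.pyGetD prev ((c : Int) + 1) 0 +
                  (st.1 + PySem.List.pyGetD row (c : Int) 0)])) (a, l0)
    = (a + ((List.range m).map (fun (c : Nat) => PySem.List.pyGetD row (c : Int) 0)).sum,
       l0 ++ (List.range m).map (fun (c : Nat) =>
         PySem.List.pyGetD prev ((c : Int) + 1) 0 +
           (a + ((List.range (c + 1)).map (fun (j : Nat) => PySem.List.pyGetD row (j : Int) 0)).sum))) := by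
  induction m with
  | zero => simp
  | succ m ih =>
    rw [List.range_succ, List.foldl_append, ih]
    simp [List.range_succ]
    ring

-- one step of the outer fold turns table row i into table row i+1
lemma pv_buildRow (grid : List (List Int)) (n i : Nat) :
    (0 : Int) :: (List.range n).map (fun (c : Nat) =>
        PySem.List.pyGetD (pvProw grid n i) ((c : Int) + 1) 0 +
          ((0 : Int) + ((List.range (c + 1)).map
            (fun (j : Nat) => PySem.List.pyGetD (PySem.List.pyGetD grid (i : Int) []) (j : Int) 0)).sum))
    = pvProw grid n (i + 1) := by
  have hrhs : pvProw grid n (i + 1)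
      = pvS grid (i + 1) 0 :: (List.range n).map (fun (c : Nat) => pvS grid (i + 1) (c + 1)) := by
    simp [pvProw, List.range_succ_eq_map, List.map_map]
  rw [hrhs, pvS_zero_col]
  congr 1
  apply List.map_congr_left
  intro c hc
  have hc' : c < n := List.mem_range.mp hc
  have hget : PySem.List.pyGetD (pvProw grid n i) ((c : Int) + 1) 0 = pvS grid i (c + 1) := by
    have h1 : ((c : Int) + 1) = ((c + 1 : Nat) : Int) := by push_cast; ring
    rw [h1, PySem.List.pyGetD_natCast, pvProw, PySem.List.getD_map_range _ _ _ _ (by omega)]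
  rw [hget, pvS_succ_row]
  simp [pvRowSum, pvCell]

-- the outer fold of port B builds the whole prefix table
lemma pv_table (grid : List (List Int)) (n : Nat) (m : Nat) :
    (List.range m).foldl (fun (P : List (List Int)) (r : Nat) =>
        P ++ [((List.range n).foldl (fun (st : Int × List Int) (c : Nat) =>
          (st.1 + PySem.List.pyGetD (PySem.List.pyGetD grid (r : Int) []) (c : Int) 0,
           st.2 ++ [PySem.List.pyGetD (PySem.List.pyGetD P (-1) []) ((c : Int) + 1) 0 +
                    (st.1 + PySem.List.pyGetD (PySem.List.pyGetD grid (r : Int) []) (c : Int) 0)]))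
          (0, [0])).2]) [List.replicate (n + 1) 0]
    = (List.range (m + 1)).map (pvProw grid n) := by
  induction m with
  | zero => simp [pvProw_zero]
  | succ m ih =>
    rw [List.range_succ, List.foldl_append, ih]
    simp only [List.foldl_cons, List.foldl_nil]
    have hprev : PySem.List.pyGetD ((List.range (m + 1)).map (pvProw grid n)) (-1) []
        = pvProw grid n m := by
      simp [PySem.List.pyGetD, PySem.List.pyGet?, PySem.List.pyIdx?]
    rw [hprev, pv_inner_fold]
    simp only [List.singleton_append]
    rw [pv_buildRow]
    rw [show [pvProw grid n (m + 1)] = (List.map (pvProw grid n) [m + 1]) from rfl]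
    rw [← List.map_append, ← List.range_succ]

lemma pvS_add_row (grid : List (List Int)) (ρ κ j : Nat) :
    pvS grid (ρ + κ) j = pvS grid ρ j + ((List.range κ).map (fun r => pvRowSum grid (ρ + r) j)).sum := by
  simp [pvS, List.range_add, List.map_map, Function.comp_def]

lemma pvRowSum_add_col (grid : List (List Int)) (i γ κ : Nat) :
    pvRowSum grid i (γ + κ) = pvRowSum grid i γ + ((List.range κ).map (fun c => pvCell grid i (γ + c))).sum := by
  simp [pvRowSum, List.range_add, List.map_map, Function.comp_def]

-- the window sum is the four-term difference of 2D prefix sums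
lemma pv_window (grid : List (List Int)) (ρ γ κ : Nat) :
    ((List.range κ).map (fun r => ((List.range κ).map (fun c => pvCell grid (ρ + r) (γ + c))).sum)).sum
    = pvS grid (ρ + κ) (γ + κ) - pvS grid ρ (γ + κ) - pvS grid (ρ + κ) γ + pvS grid ρ γ := by
  have h1 : ((List.range κ).map (fun r => ((List.range κ).map (fun c => pvCell grid (ρ + r) (γ + c))).sum)).sum
      = ((List.range κ).map (fun r => pvRowSum grid (ρ + r) (γ + κ) - pvRowSum grid (ρ + r) γ)).sum := by
    apply congrArg
    apply List.map_congr_left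
    intro r _
    rw [pvRowSum_add_col]
    ring
  rw [h1, pv_sum_map_sub, pvS_add_row grid ρ κ (γ + κ), pvS_add_row grid ρ κ γ]
  ring

-- reading the prefix table at in-range Nat indices
lemma pv_lookup (grid : List (List Int)) (n i j : Nat) (hi : i ≤ n) (hj : j ≤ n) :
    PySem.List.pyGetD (PySem.List.pyGetD ((List.range (n + 1)).map (pvProw grid n)) ((i : Nat) : Int) []) ((j : Nat) : Int) 0
    = pvS grid i j := by
  rw [PySem.List.pyGetD_natCast, PySem.List.pyGetD_natCast,
      PySem.List.getD_map_range _ _ _ _ (by omega), pvProw,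
      PySem.List.getD_map_range _ _ _ _ (by omega)]

-- A's per-window double summation equals the prefix-sum difference
lemma pv_elemA (grid : List (List Int)) (κ ρ γ : Nat) :
    ((PySem.List.pyRange 0 (κ : Int) 1).flatMap (fun r => (PySem.List.pyRange 0 (κ : Int) 1).map (fun c =>
        PySem.List.pyGetD (PySem.List.pyGetD grid ((ρ : Int) + r) []) ((γ : Int) + c) 0))).sum
    = pvS grid (ρ + κ) (γ + κ) - pvS grid ρ (γ + κ) - pvS grid (ρ + κ) γ + pvS grid ρ γ := by
  have hpr : PySem.List.pyRange 0 (κ : Int) 1 = (List.range κ).map (fun (j : Nat) => (j : Int)) := by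
    rw [PySem.List.pyRange_one]
    simp
  rw [hpr, List.flatMap_map, pv_sum_flatMap, ← pv_window]
  apply congrArg
  apply List.map_congr_left
  intro r _
  rw [List.map_map]
  apply congrArg
  apply List.map_congr_left
  intro c _
  simp only [Function.comp]
  rw [show (ρ : Int) + (r : Int) = ((ρ + r : Nat) : Int) by push_cast; ring,
      show (γ : Int) + (c : Int) = ((γ + c : Nat) : Int) by push_cast; ring]
  rfl

theorem pv_main (grid : List (List Int)) (k : Int) (hk : 0 ≤ k) :
    conv_sum_gen grid k = conv_sum_gen_alt grid k := by
  obtain ⟨κ, rfl⟩ : ∃ κ : Nat, k = (κ : Int) := ⟨k.toNat, (Int.toNat_of_nonneg hk).symm⟩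
  simp only [conv_sum_gen, conv_sum_gen_alt]
  by_cases hsz : (grid.length : Int) - (κ : Int) + 1 ≤ 0
  · rw [if_pos hsz, PySem.List.pyRange_one_eq_nil hsz]
    simp
  · rw [if_neg hsz]
    push Not at hsz
    set n := grid.length with hn
    rw [pv_table grid n n]
    set size : Int := (n : Int) - (κ : Int) + 1 with hsize
    have hpr : PySem.List.pyRange 0 size 1 = (List.range size.toNat).map (fun (j : Nat) => (j : Int)) := by
      rw [PySem.List.pyRange_one]
      simp
    rw [hpr, List.flatMap_map, List.flatMap_map, List.flatMap, List.flatMap]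
    congr 1
    apply List.map_congr_left
    intro γ hγ
    rw [List.map_map, List.map_map]
    apply List.map_congr_left
    intro ρ hρ
    simp only [Function.comp]
    have hρ' : ρ + κ ≤ n := by
      have := List.mem_range.mp hρ
      omega
    have hγ' : γ + κ ≤ n := by
      have := List.mem_range.mp hγ
      omega
    rw [pv_elemA grid κ ρ γ]
    rw [show (ρ : Int) + (κ : Int) = ((ρ + κ : Nat) : Int) by push_cast; ring,
        show (γ : Int) + (κ : Int) = ((γ + κ : Nat) : Int) by push_cast; ring]
    rw [pv_lookup grid n (ρ + κ) (γ + κ) hρ' hγ',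
        pv_lookup grid n ρ (γ + κ) (by omega) hγ',
        pv_lookup grid n (ρ + κ) γ hρ' (by omega),
        pv_lookup grid n ρ γ (by omega) (by omega)]

-- ===== VERDICT (by name: the statement is the Claim_ definition above) =====
theorem conv_sum_gen_spec : Claim_equal_conv_sum_gen := by
  intro grid kernel_size _ hpre
  unfold Spec_conv_sum_gen
  exact pv_main grid kernel_size hpre.1
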